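-- pv_equiv track=rewrite | github.com/jhnmrtnssn/advent-of-code | 2023/day13/part2.py | cluster_cols_to_int
-- ===== SOURCE A (Python) =====
-- def cluster_cols_to_int(cluster):
--     column_values = []
--     for i in range(0, len(cluster[0])):
--         column = [row[i] for row in cluster]
--         value = 0
--         n_smudges = column.count("#")
--         for j, char in enumerate(reversed(column)):
--             if char == "#":
--                 value += 2**j
--         column_values.append((value, n_smudges))
--     return column_values
-- ===== SOURCE B (Python) =====
-- def cluster_cols_to_int(cluster):
--     # Single row-major pass: keep one (value, smudges) accumulator per column and
--     # update all of them Horner-style as each row streams by (no transpose, no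
--     # per-column inner loop).
--     acc = [(0, 0)] * len(cluster[0])
--     for row in cluster:
--         acc = [(v * 2 + (c == "#"), s + (c == "#")) for (v, s), c in zip(acc, row)]
--     return acc
-- ===== Notes on version B (the rewrite author's own statement) =====
-- stated objective: alternative
-- what changed: B makes a single row-major pass keeping one (value, smudges) accumulator per column, updated Horner-style as each row streams by, instead of A's column-major scheme that extracts each column and accumulates powers of two over its reversed entries.
import Mathlib
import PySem

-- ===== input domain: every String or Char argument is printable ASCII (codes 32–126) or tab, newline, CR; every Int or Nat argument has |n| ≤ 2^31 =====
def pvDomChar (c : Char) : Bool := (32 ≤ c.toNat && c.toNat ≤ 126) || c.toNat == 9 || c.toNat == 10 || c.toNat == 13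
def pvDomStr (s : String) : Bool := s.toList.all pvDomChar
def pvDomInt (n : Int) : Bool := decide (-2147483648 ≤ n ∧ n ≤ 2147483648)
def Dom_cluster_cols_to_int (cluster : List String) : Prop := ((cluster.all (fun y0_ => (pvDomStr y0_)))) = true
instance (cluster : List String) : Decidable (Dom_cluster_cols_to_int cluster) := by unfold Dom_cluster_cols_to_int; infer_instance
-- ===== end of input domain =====

-- B makes one row-major pass with a per-column (value, smudges) accumulator instead of A's column extraction; alternative decomposition, same cost.


-- ===== PORT A =====
def cluster_cols_to_int (cluster : List String) : List (Int × Int) :=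
  (PySem.List.pyRange 0 (PySem.Str.len ((PySem.List.pyGet? cluster 0).getD "")) 1).foldl
    (fun column_values i =>
      let column : List Char := cluster.map (fun row => (PySem.Str.pyGet? row i).getD ' ')
      let n_smudges : Int := (PySem.List.count column '#' : Nat)
      let value : Int := (PySem.List.enumerate column.reverse).foldl
        (fun value jc => if jc.2 = '#' then value + 2 ^ jc.1.toNat else value) 0
      column_values ++ [(value, n_smudges)]) []

-- ===== PORT B =====
-- body of Source B's comprehension: ((v, s), c) ↦ (v*2 + (c=='#'), s + (c=='#'))
def pvCombine (p : (Int × Int) × Char) : Int × Int :=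
  (p.1.1 * 2 + (if p.2 = '#' then 1 else 0), p.1.2 + (if p.2 = '#' then 1 else 0))

def cluster_cols_to_int_alt (cluster : List String) : List (Int × Int) :=
  cluster.foldl
    (fun acc row => (acc.zip row.toList).map pvCombine)
    (List.replicate ((PySem.List.pyGet? cluster 0).getD "").toList.length ((0 : Int), (0 : Int)))

-- ===== PRECONDITION & SPEC =====
-- Pre_ excludes exactly the inputs where A raises IndexError: the empty cluster (cluster[0])
-- and clusters where some row is shorter than the first row (row[i]).
def Pre_cluster_cols_to_int (cluster : List String) : Prop :=
  cluster ≠ [] ∧ ∀ s ∈ cluster, (cluster.headD "").toList.length ≤ s.toList.length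
instance (cluster : List String) : Decidable (Pre_cluster_cols_to_int cluster) := by
  unfold Pre_cluster_cols_to_int; infer_instance
def pvWitness_cluster_cols_to_int : List String := ["#.", ".#", "##"]

def Spec_cluster_cols_to_int (cluster : List String) (out : List (Int × Int)) : Prop := out = cluster_cols_to_int_alt cluster
instance (cluster : List String) (out : List (Int × Int)) : Decidable (Spec_cluster_cols_to_int cluster out) := by unfold Spec_cluster_cols_to_int; infer_instance

-- ===== CLAIM (what is proved, stated in full; the proofs are below) =====
def Claim_equal_cluster_cols_to_int : Prop := ∀ (cluster : List String), Dom_cluster_cols_to_int cluster → Pre_cluster_cols_to_int cluster → Spec_cluster_cols_to_int cluster (cluster_cols_to_int cluster)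

-- ===== LEMMAS AND PROOFS =====

-- bit value of a reversed column, least significant first
def pvS : List Char → Int
  | [] => 0
  | c :: m => (if c = '#' then 1 else 0) + 2 * pvS m

theorem pvS_append (m : List Char) (c : Char) :
    pvS (m ++ [c]) = pvS m + 2 ^ m.length * (if c = '#' then 1 else 0) := by
  induction m with
  | nil => simp [pvS]
  | cons x m ih => simp [pvS, ih, pow_succ]; split_ifs <;> ring

theorem pvA_enum (m : List Char) : ∀ (k : Nat) (v : Int),
    (PySem.List.enumerate m (k : Int)).foldl
      (fun value jc => if jc.2 = '#' then value + 2 ^ jc.1.toNat else value) v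
    = v + 2 ^ k * pvS m := by
  induction m with
  | nil => intro k v; simp [PySem.List.enumerate, pvS]
  | cons c m ih =>
    intro k v
    rw [PySem.List.enumerate_cons]
    have hcast : ((k : Int) + 1) = ((k + 1 : Nat) : Int) := by push_cast; ring
    simp only [List.foldl_cons, hcast, ih (k + 1)]
    simp only [pvS, Int.toNat_natCast, pow_succ]
    split_ifs <;> ring

-- one column folded top-to-bottom with pvCombine's per-cell update (Horner + counting)
theorem pvCol_fold (l : List Char) : ∀ (a s : Int),
    l.foldl (fun p c => pvCombine (p, c)) (a, s)
    = (a * 2 ^ l.length + pvS l.reverse, s + (l.count '#' : Nat)) := by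
  induction l with
  | nil => intro a s; simp [pvS]
  | cons c l ih =>
    intro a s
    have hstep : pvCombine ((a, s), c)
        = (a * 2 + (if c = '#' then 1 else 0), s + (if c = '#' then 1 else 0)) := rfl
    rw [List.foldl_cons, hstep, ih]
    refine Prod.ext ?_ ?_
    · simp only [List.reverse_cons, pvS_append, List.length_reverse, List.length_cons, pow_succ]
      split_ifs <;> ring
    · simp only [List.count_cons]
      by_cases h : c = '#' <;> simp [h] <;> push_cast <;> ring


-- the row-major fold, viewed column-wise: each index i of the accumulator evolves independently
theorem pvRows_fold (rows : List (List Char)) (n : Nat)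
    (hlen : ∀ r ∈ rows, n ≤ r.length) :
    ∀ (acc : List (Int × Int)), acc.length = n →
    rows.foldl (fun a r => (a.zip r).map pvCombine) acc
    = (List.range n).map (fun i =>
        rows.foldl (fun p r => pvCombine (p, r.getD i ' ')) (acc.getD i (0, 0))) := by
  induction rows with
  | nil =>
    intro acc hacc
    apply List.ext_getElem
    · simp [hacc]
    · intro i h1 h2
      simp at h2
      simp [List.getD_eq_getElem?_getD, List.getElem?_eq_getElem (hacc ▸ h2)]
  | cons r rs ih =>
    intro acc hacc
    have hr : n ≤ r.length := hlen r (by simp)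
    have hacc' : ((acc.zip r).map pvCombine).length = n := by
      simp [hacc, Nat.min_eq_left hr]
    simp only [List.foldl_cons]
    rw [ih (fun x hx => hlen x (by simp [hx])) _ hacc']
    apply List.map_congr_left
    intro i hi
    have hi' : i < n := List.mem_range.mp hi
    congr 1
    have hiz : i < (acc.zip r).length := by simp [hacc]; omega
    have hia : i < acc.length := by omega
    have hir : i < r.length := by omega
    simp [List.getD_eq_getElem?_getD, List.getElem?_eq_getElem, hiz, hia, hir,
      List.getElem?_eq_getElem (List.length_map (f := pvCombine) (as := acc.zip r) ▸ hiz)]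

theorem cluster_cols_to_int_spec : Claim_equal_cluster_cols_to_int := by
  intro cluster _hdom hpre
  obtain ⟨hne, hlen⟩ := hpre
  obtain ⟨r0, rs, rfl⟩ := List.exists_cons_of_ne_nil hne
  unfold Spec_cluster_cols_to_int cluster_cols_to_int cluster_cols_to_int_alt
  set n := r0.toList.length with hn
  -- B side: rewrite to a map over column indices, then close each column with pvCol_fold
  have hBrows : ∀ r ∈ (r0 :: rs), n ≤ r.toList.length := by
    intro r hr; have := hlen r hr; simpa using this
  have hB := pvRows_fold ((r0 :: rs).map String.toList) n
    (by intro r hr; obtain ⟨s, hs, rfl⟩ := List.mem_map.mp hr; exact hBrows s hs)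
    (List.replicate n ((0 : Int), (0 : Int))) (by simp)
  rw [List.foldl_map] at hB
  have hget0 : ((PySem.List.pyGet? (r0 :: rs) 0).getD "").toList.length = n := by
    simp [PySem.List.pyGet?, PySem.List.pyIdx?]
    rfl
  rw [hget0, hB]
  -- A side: range over Int, appending singletons = map
  have hlen0 : PySem.Str.len ((PySem.List.pyGet? (r0 :: rs) 0).getD "")
      = (n : Int) := by
    simp [PySem.Str.len_eq]
    rfl
  rw [hlen0, PySem.List.pyRange_zero_natCast, List.foldl_map,
    PySem.List.foldl_append_singleton_eq_map, List.nil_append]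
  apply List.map_congr_left
  intro i hi
  have hi' : i < n := List.mem_range.mp hi
  -- identify A's extracted column with B's per-index reads
  have hcol : (r0 :: rs).map (fun row => (PySem.Str.pyGet? row (i : Int)).getD ' ')
      = (r0 :: rs).map (fun row => row.toList.getD i ' ') := by
    apply List.map_congr_left
    intro row hrow
    have hilt : i < row.toList.length := lt_of_lt_of_le hi' (hBrows row hrow)
    have hilt2 : i < row.length := hilt
    simp [PySem.Str.pyGet?_eq, PySem.List.pyGet?, PySem.List.pyIdx?, hilt2,
      List.getD_eq_getElem?_getD, List.getElem?_eq_getElem hilt]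
  rw [hcol]
  -- B's per-index fold over rows = fold over the column list
  have hBfold : ((r0 :: rs).map String.toList).foldl
        (fun p r => pvCombine (p, r.getD i ' '))
        ((List.replicate n ((0:Int),(0:Int))).getD i (0, 0))
      = ((r0 :: rs).map (fun row => row.toList.getD i ' ')).foldl
        (fun p c => pvCombine (p, c)) (0, 0) := by
    rw [List.foldl_map]
    have : (List.replicate n ((0:Int),(0:Int))).getD i (0, 0) = ((0:Int),(0:Int)) := by
      simp [List.getD_eq_getElem?_getD, List.getElem?_replicate, hi']
    rw [this, List.foldl_map]
  rw [hBfold, pvCol_fold]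
  refine Prod.ext ?_ ?_
  · have hA := pvA_enum ((r0 :: rs).map (fun row => row.toList.getD i ' ')).reverse 0 0
    simp only [Nat.cast_zero, pow_zero, one_mul, zero_add] at hA
    rw [hA]
    ring
  · simp [PySem.List.count_eq]

-- ===== VERDICT (by name: the statement is the Claim_ definition above) =====
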